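-- pv_equiv track=rewrite | github.com/savage-leo/ARIA_PRO | backend/services/institutional_proxy.py | get_best_model_for_task
-- ===== SOURCE A (Python) =====
-- REMOTE_MODELS = {
--     # Reasoning & Strategy Models
--     "llama-3.1-405b": {
--         "url": "https://api.together.ai/v1",
--         "api_key": "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",
--         "model_id": "meta-llama/llama-3.1-405b-instruct",
--         "specialty": ["strategy", "reasoning", "analysis", "default"]
--     },
--     "llama-3.3-70b": {
--         "url": "https://api.together.ai/v1",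
--         "api_key": "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",
--         "model_id": "meta-llama/llama-3.3-70b-instruct",
--         "specialty": ["strategy", "reasoning", "analysis", "default"]
--     },
--
--     # Coding & Development Models
--     "qwen-coder-32b": {
--         "url": "https://api.together.ai/v1",
--         "api_key": "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",
--         "model_id": "qwen/qwen-2.5-coder-32b-instruct",
--         "specialty": ["code", "development", "debugging", "audit"]
--     },
--     "deepseek-r1-14b": {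
--         "url": "https://api.together.ai/v1",
--         "api_key": "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",
--         "model_id": "deepseek/deepseek-r1-distill-qwen-14b",
--         "specialty": ["code", "development", "debugging", "math"]
--     },
--
--     # Vision & Multimodal Models
--     "qwen-vl-72b": {
--         "url": "https://api.together.ai/v1",
--         "api_key": "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",
--         "model_id": "qwen/qwen2.5-vl-72b-instruct",
--         "specialty": ["vision", "multimodal", "analysis"]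
--     },
--
--     # Fast & Efficient Models
--     "reka-flash-3": {
--         "url": "https://api.together.ai/v1",
--         "api_key": "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",
--         "model_id": "rekaai/reka-flash-3:free",
--         "specialty": ["fast", "efficient", "default"]
--     },
--     "qwq-32b": {
--         "url": "https://api.together.ai/v1",
--         "api_key": "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",
--         "model_id": "qwen/qwq-32b:free",
--         "specialty": ["fast", "efficient", "default"]
--     },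
--     "llama-3.2-3b": {
--         "url": "https://api.together.ai/v1",
--         "api_key": "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",
--         "model_id": "meta-llama/llama-3.2-3b-instruct",
--         "specialty": ["fast", "efficient", "default"]
--     }
-- }
--
-- def get_best_model_for_task(task: str, available_models: list) -> str:
--     """Intelligent model selection based on task type"""
--     task = task.lower()
--
--     # Task to model priority mapping
--     task_priorities = {
--         "strategy": ["llama-3.1-405b", "llama-3.3-70b", "qwen-vl-72b"],
--         "reasoning": ["llama-3.1-405b", "llama-3.3-70b", "qwen-vl-72b"],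
--         "analysis": ["llama-3.1-405b", "llama-3.3-70b", "qwen-vl-72b"],
--         "code": ["qwen-coder-32b", "deepseek-r1-14b", "llama-3.3-70b"],
--         "development": ["qwen-coder-32b", "deepseek-r1-14b", "llama-3.3-70b"],
--         "debugging": ["qwen-coder-32b", "deepseek-r1-14b", "llama-3.3-70b"],
--         "audit": ["qwen-coder-32b", "deepseek-r1-14b", "llama-3.1-405b"],
--         "math": ["deepseek-r1-14b", "llama-3.1-405b", "llama-3.3-70b"],
--         "vision": ["qwen-vl-72b", "llama-3.3-70b", "llama-3.1-405b"],
--         "multimodal": ["qwen-vl-72b", "llama-3.3-70b"],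
--         "fast": ["reka-flash-3", "qwq-32b", "llama-3.2-3b"],
--         "efficient": ["reka-flash-3", "qwq-32b", "llama-3.2-3b"],
--         "default": ["llama-3.3-70b", "reka-flash-3", "qwq-32b"]
--     }
--
--     # Get priority list for this task
--     priorities = task_priorities.get(task, task_priorities["default"])
--
--     # Check remote models first
--     for model in priorities:
--         if model in REMOTE_MODELS:
--             return model
--
--     # Check local models as fallback
--     for model in available_models:
--         if any(priority.lower() in model.lower() for priority in priorities):
--             return model
--
--     # Final fallback
--     return available_models[0] if available_models else "reka-flash-3"
-- ===== SOURCE B (Python) =====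
-- # Precomputed answer table: since every priority list's first model is a
-- # registered remote model, A's selection collapses to "the best model for this
-- # task kind" -- a direct task -> model-name map, no lists and no scans at all.
-- BEST_MODEL = {
--     "strategy": "llama-3.1-405b",
--     "reasoning": "llama-3.1-405b",
--     "analysis": "llama-3.1-405b",
--     "code": "qwen-coder-32b",
--     "development": "qwen-coder-32b",
--     "debugging": "qwen-coder-32b",
--     "audit": "qwen-coder-32b",
--     "math": "deepseek-r1-14b",
--     "vision": "qwen-vl-72b",
--     "multimodal": "qwen-vl-72b",
--     "fast": "reka-flash-3",
--     "efficient": "reka-flash-3",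
--     "default": "llama-3.3-70b",
-- }
--
--
-- def get_best_model_for_task(task: str, available_models: list) -> str:
--     return BEST_MODEL.get(task.lower(), "llama-3.3-70b")
-- ===== Notes on version B (the rewrite author's own statement) =====
-- stated objective: simpler
-- what changed: B replaces A's priority-list table and its three scanning loops (priority list vs REMOTE_MODELS keys, substring scan over available_models, head-or-sentinel fallback) with a precomputed task -> model-name map and a single .get with default, exploiting the proved invariant that every priority list's head is a REMOTE_MODELS key, which makes A's first loop always return the head and its fallbacks dead code.
import Mathlib
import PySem

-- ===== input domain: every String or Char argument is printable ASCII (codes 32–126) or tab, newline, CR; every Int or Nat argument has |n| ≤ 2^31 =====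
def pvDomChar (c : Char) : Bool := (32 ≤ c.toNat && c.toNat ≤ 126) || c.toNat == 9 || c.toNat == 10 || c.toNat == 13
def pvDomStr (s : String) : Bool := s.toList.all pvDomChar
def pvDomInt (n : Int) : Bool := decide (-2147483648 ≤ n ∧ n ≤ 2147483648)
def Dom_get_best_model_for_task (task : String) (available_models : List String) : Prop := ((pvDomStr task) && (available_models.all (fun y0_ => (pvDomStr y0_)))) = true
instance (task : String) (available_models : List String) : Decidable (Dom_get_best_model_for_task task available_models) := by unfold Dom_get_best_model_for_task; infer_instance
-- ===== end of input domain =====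

-- B replaces A's priority-list table and three scanning loops with a precomputed
-- task -> best-model map and one lookup (the head of every priority list is a
-- REMOTE_MODELS key, so A's fallbacks are dead code); objective: simpler.


-- ===== PORT A =====
-- Only membership 'model in REMOTE_MODELS' is used by A, so REMOTE_MODELS is ported as its key list
-- (the values — urls, api keys, specialties — never influence the result).
def remoteModelKeys : List String :=
  ["llama-3.1-405b", "llama-3.3-70b", "qwen-coder-32b", "deepseek-r1-14b",
   "qwen-vl-72b", "reka-flash-3", "qwq-32b", "llama-3.2-3b"]

-- A's task_priorities literal
def taskPriorities : PySem.Dict String (List String) :=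
  PySem.Dict.ofList
    [("strategy", ["llama-3.1-405b", "llama-3.3-70b", "qwen-vl-72b"]),
     ("reasoning", ["llama-3.1-405b", "llama-3.3-70b", "qwen-vl-72b"]),
     ("analysis", ["llama-3.1-405b", "llama-3.3-70b", "qwen-vl-72b"]),
     ("code", ["qwen-coder-32b", "deepseek-r1-14b", "llama-3.3-70b"]),
     ("development", ["qwen-coder-32b", "deepseek-r1-14b", "llama-3.3-70b"]),
     ("debugging", ["qwen-coder-32b", "deepseek-r1-14b", "llama-3.3-70b"]),
     ("audit", ["qwen-coder-32b", "deepseek-r1-14b", "llama-3.1-405b"]),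
     ("math", ["deepseek-r1-14b", "llama-3.1-405b", "llama-3.3-70b"]),
     ("vision", ["qwen-vl-72b", "llama-3.3-70b", "llama-3.1-405b"]),
     ("multimodal", ["qwen-vl-72b", "llama-3.3-70b"]),
     ("fast", ["reka-flash-3", "qwq-32b", "llama-3.2-3b"]),
     ("efficient", ["reka-flash-3", "qwq-32b", "llama-3.2-3b"]),
     ("default", ["llama-3.3-70b", "reka-flash-3", "qwq-32b"])]

-- 'for model in priorities: if model in REMOTE_MODELS: return model'
def pvFindRemote : List String → Option String
  | [] => none
  | m :: rest => if remoteModelKeys.contains m then some m else pvFindRemote rest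

-- 'for model in available_models: if any(priority.lower() in model.lower() for priority in priorities): return model'
def pvFindLocal (priorities : List String) : List String → Option String
  | [] => none
  | m :: rest =>
      if priorities.any (fun priority => PySem.Str.isIn (PySem.Str.lower priority) (PySem.Str.lower m))
      then some m else pvFindLocal priorities rest

def get_best_model_for_task (task : String) (available_models : List String) : String :=
  let task := PySem.Str.lower task
  let priorities := PySem.Dict.getD taskPriorities task ["llama-3.3-70b", "reka-flash-3", "qwq-32b"]
  match pvFindRemote priorities with
  | some m => m
  | none =>
      match pvFindLocal priorities available_models with
      | some m => m
      | none =>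
          match available_models with
          | m :: _ => m
          | [] => "reka-flash-3"

-- ===== PORT B =====
-- B's precomputed task -> best-model map (Source B's BEST_MODEL)
def bestModelTable : PySem.Dict String String :=
  PySem.Dict.ofList
    [("strategy", "llama-3.1-405b"),
     ("reasoning", "llama-3.1-405b"),
     ("analysis", "llama-3.1-405b"),
     ("code", "qwen-coder-32b"),
     ("development", "qwen-coder-32b"),
     ("debugging", "qwen-coder-32b"),
     ("audit", "qwen-coder-32b"),
     ("math", "deepseek-r1-14b"),
     ("vision", "qwen-vl-72b"),
     ("multimodal", "qwen-vl-72b"),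
     ("fast", "reka-flash-3"),
     ("efficient", "reka-flash-3"),
     ("default", "llama-3.3-70b")]

def get_best_model_for_task_alt (task : String) (available_models : List String) : String :=
  PySem.Dict.getD bestModelTable (PySem.Str.lower task) "llama-3.3-70b"

-- ===== PRECONDITION & SPEC =====
def Spec_get_best_model_for_task (task : String) (available_models : List String) (out : String) : Prop := out = get_best_model_for_task_alt task available_models
instance (task : String) (available_models : List String) (out : String) : Decidable (Spec_get_best_model_for_task task available_models out) := by unfold Spec_get_best_model_for_task; infer_instance

-- ===== CLAIM (what is proved, stated in full; the proofs are below) =====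
def Claim_equal_get_best_model_for_task : Prop := ∀ (task : String) (available_models : List String), Dom_get_best_model_for_task task available_models → Spec_get_best_model_for_task task available_models (get_best_model_for_task task available_models)

-- ===== LEMMAS AND PROOFS =====

-- B's table entries are exactly A's entries with the value replaced by its head:
-- the same keys in the same order, so the two lookups always align.
theorem pv_tables_aligned :
    bestModelTable.items
      = taskPriorities.items.map (fun p => (p.1, p.2.headD "")) := by
  decide

-- Every value of A's table (and the default list) has a remote key as its head,
-- so A's first loop returns exactly the head B's table stores.
theorem pv_head_remote (pr : List String)
    (h : pr = ["llama-3.3-70b", "reka-flash-3", "qwq-32b"] ∨ ∃ k, (k, pr) ∈ taskPriorities.items) :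
    pvFindRemote pr = some (pr.headD "") := by
  rcases h with rfl | ⟨k, hk⟩
  · decide
  · fin_cases hk <;> decide

-- ===== VERDICT (by name: the statement is the Claim_ definition above) =====
theorem get_best_model_for_task_spec : Claim_equal_get_best_model_for_task := by
  intro task av _
  unfold Spec_get_best_model_for_task
  unfold get_best_model_for_task get_best_model_for_task_alt
  unfold PySem.Dict.getD PySem.Dict.get?
  rw [pv_tables_aligned, List.find?_map]
  have hpred : ((fun p : String × String => p.1 == PySem.Str.lower task) ∘
      (fun p : String × List String => (p.1, p.2.headD ""))) =
      (fun p : String × List String => p.1 == PySem.Str.lower task) := rfl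
  rw [hpred]
  cases hf : List.find? (fun p => p.1 == PySem.Str.lower task) taskPriorities.items with
  | none =>
      simp only [hf, Option.map_none, Option.getD_none]
      rw [pv_head_remote _ (Or.inl rfl)]
      rfl
  | some pair =>
      have hmem := List.mem_of_find?_eq_some hf
      simp only [hf, Option.map_some, Option.getD_some]
      rw [pv_head_remote pair.2 (Or.inr ⟨pair.1, hmem⟩)]
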